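-- pv_equiv track=rewrite | github.com/julesDesjardin/streamGraphics | TimeTower/timeTowerUtils.py | getAllResults
-- ===== SOURCE A (Python) =====
-- DNF_RESULT = 10 * 60 * 100  # 10 min
--
-- def getReadableResult(result):
--     if (result >= DNF_RESULT):
--         return 'DNF'
--     output = ''
--     if (result >= 6000):
--         output = output + f'{int(result / 6000)}:'
--     result = result % 6000
--     output = output + f'{int(result / 100):02}.{result % 100:02}'
--     return output
--
-- def getAllResults(results, criteria):
--     outputArray = []
--     minFound = False
--     maxFound = False
--     if len(results) <= 3 or criteria != 'average':
--         minFound = True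
--         maxFound = True
--     for result in results:
--         if not maxFound and (result == max(results) or result >= DNF_RESULT):
--             maxFound = True
--             outputArray.append(f'({getReadableResult(result)})')
--         elif not minFound and (result == min(results)):
--             minFound = True
--             outputArray.append(f'({getReadableResult(result)})')
--         else:
--             outputArray.append(f'{getReadableResult(result)}')
--     return ' '.join(outputArray)
-- ===== SOURCE B (Python) =====
-- DNF_RESULT = 10 * 60 * 100  # 10 min
--
-- def getReadableResult(result):
--     if (result >= DNF_RESULT):
--         return 'DNF'
--     output = ''
--     if (result >= 6000):
--         output = output + f'{int(result / 6000)}:'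
--     result = result % 6000
--     output = output + f'{int(result / 100):02}.{result % 100:02}'
--     return output
--
-- def getAllResults(results, criteria):
--     if len(results) <= 3 or criteria != 'average':
--         return ' '.join(getReadableResult(r) for r in results)
--     maxval = max(results)
--     minval = min(results)
--     maxIndex = next(i for i, r in enumerate(results) if r == maxval or r >= DNF_RESULT)
--     minIndex = next((i for i, r in enumerate(results) if r == minval and i != maxIndex), None)
--     parts = []
--     for i, r in enumerate(results):
--         if i == maxIndex or i == minIndex:
--             parts.append(f'({getReadableResult(r)})')
--         else:
--             parts.append(getReadableResult(r))
--     return ' '.join(parts)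
-- ===== Notes on version B (the rewrite author's own statement) =====
-- stated objective: alternative
-- what changed: Replaces A's loop-carried minFound/maxFound boolean flags (with max()/min() re-evaluated inside the loop) by an up-front computation of max/min and of the two parenthesized positions (first max-or-DNF index, then first min index distinct from it), followed by a single index-driven formatting pass.
import Mathlib
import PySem

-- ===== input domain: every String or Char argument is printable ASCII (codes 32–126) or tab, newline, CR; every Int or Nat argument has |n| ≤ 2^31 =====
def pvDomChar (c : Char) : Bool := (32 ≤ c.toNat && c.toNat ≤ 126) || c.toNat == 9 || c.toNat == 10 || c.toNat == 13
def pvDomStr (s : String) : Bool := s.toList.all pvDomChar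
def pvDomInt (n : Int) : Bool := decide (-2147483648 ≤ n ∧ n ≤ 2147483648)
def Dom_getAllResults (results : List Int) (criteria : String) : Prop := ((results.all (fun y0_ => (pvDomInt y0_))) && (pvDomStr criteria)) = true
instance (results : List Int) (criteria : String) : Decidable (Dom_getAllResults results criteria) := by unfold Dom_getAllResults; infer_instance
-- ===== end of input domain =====

-- B replaces A's loop-carried minFound/maxFound flags (and per-iteration max()/min() calls)
-- by an up-front computation of the two parenthesized positions followed by one
-- index-driven formatting pass (objective: alternative decomposition).

-- ===== PORT A =====
-- shared helper: port of getReadableResult (used verbatim by both Pythons).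
-- f'{x:02}' for the nonnegative x arising here: pad with one leading zero when one digit.
def pvPad2 (n : Int) : String :=
  let s := PySem.Int.toStr n
  if PySem.Str.len s < 2 then "0" ++ s else s

-- int(result / 6000) and int(result / 100): exact as floor division on this domain
-- (the operand is nonnegative and far below the float-rounding threshold).
def pvReadable (result : Int) : String :=
  if result ≥ 60000 then "DNF"
  else
    let output : String := ""
    let output := if result ≥ 6000 then output ++ PySem.Int.toStr (PySem.Int.floordiv result 6000) ++ ":" else output
    let r := PySem.Int.mod result 6000
    output ++ pvPad2 (PySem.Int.floordiv r 100) ++ "." ++ pvPad2 (PySem.Int.mod r 100)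

-- the for-loop of A, carrying (outputArray, minFound, maxFound); max()/min() re-evaluated
-- inside the loop exactly as A does (they are pure here, so as a value).
def pvLoopA (results : List Int) : List Int → List String × Bool × Bool → List String × Bool × Bool
  | [], st => st
  | result :: rest, (out, minF, maxF) =>
    if !maxF && (some result == PySem.List.max? results (fun y => y) || decide (result ≥ 60000)) then
      pvLoopA results rest (out ++ ["(" ++ pvReadable result ++ ")"], minF, true)
    else if !minF && (some result == PySem.List.min? results (fun y => y)) then
      pvLoopA results rest (out ++ ["(" ++ pvReadable result ++ ")"], true, maxF)
    else
      pvLoopA results rest (out ++ [pvReadable result], minF, maxF)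

def getAllResults (results : List Int) (criteria : String) : String :=
  let flags : Bool × Bool := if results.length ≤ 3 ∨ criteria ≠ "average" then (true, true) else (false, false)
  PySem.Str.join " " (pvLoopA results results ([], flags.1, flags.2)).1

-- ===== PORT B =====
-- next(i for i, r in enumerate(results) if r == maxval or r >= DNF_RESULT)
def pvFindMaxIdx (maxval : Int) : Nat → List Int → Option Nat
  | _, [] => none
  | j, r :: t => if r == maxval || decide (r ≥ 60000) then some j else pvFindMaxIdx maxval (j + 1) t

-- next((i for i, r in enumerate(results) if r == minval and i != maxIndex), None)
def pvFindMinIdx (minval : Int) (maxIdx : Nat) : Nat → List Int → Option Nat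
  | _, [] => none
  | j, r :: t => if r == minval && j != maxIdx then some j else pvFindMinIdx minval maxIdx (j + 1) t

-- the final enumerate loop: parenthesize exactly at maxIndex / minIndex
def pvFmt (maxIdx : Nat) (minIdx? : Option Nat) : Nat → List Int → List String
  | _, [] => []
  | j, r :: t =>
    (if j == maxIdx || some j == minIdx? then "(" ++ pvReadable r ++ ")" else pvReadable r)
      :: pvFmt maxIdx minIdx? (j + 1) t

def getAllResults_alt (results : List Int) (criteria : String) : String :=
  if results.length ≤ 3 ∨ criteria ≠ "average" then
    PySem.Str.join " " (results.map pvReadable)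
  else
    match PySem.List.max? results (fun y => y), PySem.List.min? results (fun y => y) with
    | some maxval, some minval =>
      match pvFindMaxIdx maxval 0 results with
      | some maxIdx =>
          PySem.Str.join " " (pvFmt maxIdx (pvFindMinIdx minval maxIdx 0 results) 0 results)
      | none => ""   -- unreachable: maxval ∈ results
    | _, _ => ""     -- unreachable: results is nonempty here

-- ===== PRECONDITION & SPEC =====
def Spec_getAllResults (results : List Int) (criteria : String) (out : String) : Prop := out = getAllResults_alt results criteria
instance (results : List Int) (criteria : String) (out : String) : Decidable (Spec_getAllResults results criteria out) := by unfold Spec_getAllResults; infer_instance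

-- ===== CLAIM (what is proved, stated in full; the proofs are below) =====
def Claim_equal_getAllResults : Prop := ∀ (results : List Int) (criteria : String), Dom_getAllResults results criteria → Spec_getAllResults results criteria (getAllResults results criteria)

-- ===== LEMMAS AND PROOFS =====

-- disabled case: with both flags true, A's loop formats every result plainly
lemma pvLoopA_all_plain (results : List Int) :
    ∀ (l : List Int) (out : List String),
    (pvLoopA results l (out, true, true)).1 = out ++ l.map pvReadable := by
  intro l
  induction l with
  | nil => intro out; simp [pvLoopA]
  | cons r t ih => intro out; simp [pvLoopA, ih]

lemma pvFindMaxIdx_ge (maxval : Int) :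
    ∀ (l : List Int) (j k : Nat), pvFindMaxIdx maxval j l = some k → j ≤ k := by
  intro l
  induction l with
  | nil => intro j k h; simp [pvFindMaxIdx] at h
  | cons r t ih =>
    intro j k h
    by_cases hp : (r == maxval || decide (r ≥ 60000)) = true
    · simp [pvFindMaxIdx, hp] at h; omega
    · simp [pvFindMaxIdx, hp] at h
      have := ih (j + 1) k h
      omega

lemma pvFindMinIdx_ge (minval : Int) (maxIdx : Nat) :
    ∀ (l : List Int) (j k : Nat), pvFindMinIdx minval maxIdx j l = some k → j ≤ k := by
  intro l
  induction l with
  | nil => intro j k h; simp [pvFindMinIdx] at h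
  | cons r t ih =>
    intro j k h
    by_cases hp : (r == minval && j != maxIdx) = true
    · simp [pvFindMinIdx, hp] at h; omega
    · simp [pvFindMinIdx, hp] at h
      have := ih (j + 1) k h
      omega

lemma pvFindMaxIdx_isSome (maxval : Int) :
    ∀ (l : List Int) (j : Nat), maxval ∈ l → ∃ k, pvFindMaxIdx maxval j l = some k := by
  intro l
  induction l with
  | nil => intro j h; simp at h
  | cons r t ih =>
    intro j h
    by_cases hp : (r == maxval || decide (r ≥ 60000)) = true
    · exact ⟨j, by simp [pvFindMaxIdx, hp]⟩
    · have hr : r ≠ maxval := by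
        intro he; apply hp; simp [he]
      have hmem : maxval ∈ t := by
        rcases List.mem_cons.mp h with h1 | h1
        · exact absurd h1.symm hr
        · exact h1
      obtain ⟨k, hk⟩ := ih (j + 1) hmem
      exact ⟨k, by simp [pvFindMaxIdx, hp, hk]⟩

-- the main invariant: A's loop over a suffix starting at index j, with flags reflecting
-- whether the parenthesized positions lie before j, produces B's index-driven formatting
lemma pvLoopA_eq_fmt (results : List Int) (maxval minval : Int)
    (hmaxv : PySem.List.max? results (fun y => y) = some maxval)
    (hminv : PySem.List.min? results (fun y => y) = some minval)
    (maxIdx : Nat) (minIdx? : Option Nat) :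
    ∀ (l : List Int) (j : Nat) (minF maxF : Bool) (out : List String),
    (maxF = true → maxIdx < j) →
    (maxF = false → pvFindMaxIdx maxval j l = some maxIdx) →
    (minF = true → ∃ i, minIdx? = some i ∧ i < j) →
    (minF = false → pvFindMinIdx minval maxIdx j l = minIdx?) →
    (pvLoopA results l (out, minF, maxF)).1 = out ++ pvFmt maxIdx minIdx? j l := by
  intro l
  induction l with
  | nil => intro j minF maxF out _ _ _ _; simp [pvLoopA, pvFmt]
  | cons r t ih =>
    intro j minF maxF out hmt hmf hnt hnf
    cases maxF with
    | true =>
      have hlt : maxIdx < j := hmt rfl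
      have hjm : (j == maxIdx) = false := by simp; omega
      have hA : (!true && (some r == PySem.List.max? results (fun y => y) || decide (r ≥ 60000))) = false := by
        simp
      cases minF with
      | true =>
        obtain ⟨i, hi, hij⟩ := hnt rfl
        have hjn : (some j == minIdx?) = false := by subst hi; simp; omega
        have hB : (!true && (some r == PySem.List.min? results (fun y => y))) = false := by simp
        simp only [pvLoopA, pvFmt, hA, hB, hjm, hjn, Bool.or_self, Bool.false_eq_true,
          if_false]
        rw [ih (j + 1) true true (out ++ [pvReadable r]) (fun _ => by omega) (by simp)
          (fun _ => ⟨i, hi, by omega⟩) (by simp)]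
        simp
      | false =>
        have hnf' := hnf rfl
        have hjne : (j != maxIdx) = true := by simp; omega
        by_cases hq : (r == minval) = true
        · -- min found at j
          have hmin : minIdx? = some j := by
            rw [← hnf']; simp [pvFindMinIdx, hq, hjne]
          have hB : (!false && (some r == PySem.List.min? results (fun y => y))) = true := by
            rw [hminv]; simp [hq]
          have hjn : (some j == minIdx?) = true := by simp [hmin]
          simp only [pvLoopA, pvFmt, hA, hB, hjm, hjn, Bool.false_or, Bool.false_eq_true,
            if_false, if_true]
          rw [ih (j + 1) true true (out ++ ["(" ++ pvReadable r ++ ")"]) (fun _ => by omega)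
            (by simp) (fun _ => ⟨j, hmin, by omega⟩) (by simp)]
          simp
        · -- nothing at j
          have hnf'' : pvFindMinIdx minval maxIdx (j + 1) t = minIdx? := by
            rw [← hnf']; simp [pvFindMinIdx, hq]
          have hjn : (some j == minIdx?) = false := by
            cases hmi : minIdx? with
            | none => simp
            | some i =>
              have := pvFindMinIdx_ge minval maxIdx t (j + 1) i (by rw [hnf'', hmi])
              simp; omega
          have hB : (!false && (some r == PySem.List.min? results (fun y => y))) = false := by
            rw [hminv]; simp [hq]
          simp only [pvLoopA, pvFmt, hA, hB, hjm, hjn, Bool.or_self, Bool.false_eq_true,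
            if_false]
          rw [ih (j + 1) false true (out ++ [pvReadable r]) (fun _ => by omega) (by simp)
            (by simp) (fun _ => hnf'')]
          simp
    | false =>
      have hmf' := hmf rfl
      by_cases hp : (r == maxval || decide (r ≥ 60000)) = true
      · -- max found at j
        have hmj : maxIdx = j := by
          have h0 : pvFindMaxIdx maxval j (r :: t) = some j := by simp [pvFindMaxIdx, hp]
          rw [h0] at hmf'
          exact (Option.some_inj.mp hmf').symm
        have hA : (!false && (some r == PySem.List.max? results (fun y => y) || decide (r ≥ 60000))) = true := by
          rw [hmaxv]; simpa using hp
        have hjm : (j == maxIdx) = true := by simp [hmj]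
        have hnfnext : minF = false → pvFindMinIdx minval maxIdx (j + 1) t = minIdx? := by
          intro h
          rw [← hnf h]
          have hne : (j != maxIdx) = false := by simp [hmj]
          simp [pvFindMinIdx, hne]
        simp only [pvLoopA, pvFmt, hA, hjm, Bool.true_or, if_true]
        rw [ih (j + 1) minF true (out ++ ["(" ++ pvReadable r ++ ")"]) (fun _ => by omega)
          (by simp) (fun h => (hnt h).imp fun i hi => ⟨hi.1, by omega⟩) hnfnext]
        simp
      · -- max not at j
        have hmf'' : pvFindMaxIdx maxval (j + 1) t = some maxIdx := by
          rw [← hmf']; simp [pvFindMaxIdx, hp]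
        have hmgt : j + 1 ≤ maxIdx := pvFindMaxIdx_ge maxval t (j + 1) maxIdx hmf''
        have hjm : (j == maxIdx) = false := by simp; omega
        have hjne : (j != maxIdx) = true := by simp; omega
        have hA : (!false && (some r == PySem.List.max? results (fun y => y) || decide (r ≥ 60000))) = false := by
          rw [hmaxv]; simpa using hp
        cases minF with
        | true =>
          obtain ⟨i, hi, hij⟩ := hnt rfl
          have hjn : (some j == minIdx?) = false := by subst hi; simp; omega
          have hB : (!true && (some r == PySem.List.min? results (fun y => y))) = false := by simp
          simp only [pvLoopA, pvFmt, hA, hB, hjm, hjn, Bool.or_self, Bool.false_eq_true,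
            if_false]
          rw [ih (j + 1) true false (out ++ [pvReadable r]) (by simp) (fun _ => hmf'')
            (fun _ => ⟨i, hi, by omega⟩) (by simp)]
          simp
        | false =>
          have hnf' := hnf rfl
          by_cases hq : (r == minval) = true
          · have hmin : minIdx? = some j := by
              rw [← hnf']; simp [pvFindMinIdx, hq, hjne]
            have hB : (!false && (some r == PySem.List.min? results (fun y => y))) = true := by
              rw [hminv]; simp [hq]
            have hjn : (some j == minIdx?) = true := by simp [hmin]
            simp only [pvLoopA, pvFmt, hA, hB, hjm, hjn, Bool.false_or, Bool.false_eq_true,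
              if_false, if_true]
            rw [ih (j + 1) true false (out ++ ["(" ++ pvReadable r ++ ")"]) (by simp)
              (fun _ => hmf'') (fun _ => ⟨j, hmin, by omega⟩) (by simp)]
            simp
          · have hnf'' : pvFindMinIdx minval maxIdx (j + 1) t = minIdx? := by
              rw [← hnf']; simp [pvFindMinIdx, hq]
            have hjn : (some j == minIdx?) = false := by
              cases hmi : minIdx? with
              | none => simp
              | some i =>
                have := pvFindMinIdx_ge minval maxIdx t (j + 1) i (by rw [hnf'', hmi])
                simp; omega
            have hB : (!false && (some r == PySem.List.min? results (fun y => y))) = false := by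
              rw [hminv]; simp [hq]
            simp only [pvLoopA, pvFmt, hA, hB, hjm, hjn, Bool.or_self, Bool.false_eq_true,
              if_false]
            rw [ih (j + 1) false false (out ++ [pvReadable r]) (by simp) (fun _ => hmf'')
              (by simp) (fun _ => hnf'')]
            simp

-- ===== VERDICT (by name: the statement is the Claim_ definition above) =====
theorem getAllResults_spec : Claim_equal_getAllResults := by
  unfold Claim_equal_getAllResults
  intro results criteria _
  unfold Spec_getAllResults getAllResults getAllResults_alt
  by_cases hd : results.length ≤ 3 ∨ criteria ≠ "average"
  · simp only [if_pos hd]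
    rw [pvLoopA_all_plain]
    simp
  · simp only [if_neg hd]
    have hne : results ≠ [] := by
      intro h; exact hd (Or.inl (by simp [h]))
    obtain ⟨maxval, hmaxv⟩ : ∃ v, PySem.List.max? results (fun y => y) = some v := by
      cases h : PySem.List.max? results (fun y => y) with
      | none => exact absurd ((PySem.List.max?_eq_none_iff _ _).mp h) hne
      | some v => exact ⟨v, rfl⟩
    obtain ⟨minval, hminv⟩ : ∃ v, PySem.List.min? results (fun y => y) = some v := by
      cases h : PySem.List.min? results (fun y => y) with
      | none => exact absurd ((PySem.List.min?_eq_none_iff _ _).mp h) hne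
      | some v => exact ⟨v, rfl⟩
    obtain ⟨maxIdx, hmaxIdx⟩ :=
      pvFindMaxIdx_isSome maxval results 0 (PySem.List.max?_mem hmaxv)
    simp only [hmaxv, hminv, hmaxIdx]
    rw [pvLoopA_eq_fmt results maxval minval hmaxv hminv maxIdx
      (pvFindMinIdx minval maxIdx 0 results) results 0 false false []
      (by simp) (fun _ => hmaxIdx) (by simp) (fun _ => rfl)]
    simp
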